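-- pv_equiv track=rewrite | github.com/MrBrantCode/unitest_baseline | mut_generate/mist_train_taco/taco_14570/solution.py | can_impress_crush
-- ===== SOURCE A (Python) =====
-- def can_impress_crush(chocolates, queries):
--     chocolates.sort()
--     results = []
--
--     for w in queries:
--         flag = 0
--         if w in chocolates:
--             flag = 1
--         else:
--             for j in range(len(chocolates) - 1):
--                 for k in range(j + 1, len(chocolates)):
--                     if chocolates[j] + chocolates[k] == w:
--                         flag = 1
--                         break
--                 if flag == 1:
--                     break
--
--         if flag == 1:
--             results.append("I Like You")
--         else:
--             results.append("I Hate You")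
--
--     return results
-- ===== SOURCE B (Python) =====
-- def can_impress_crush(chocolates, queries):
--     # B: sort (same in-place mutation as A), then precompute the set of all pair
--     # sums ONCE; each query is then two O(1) set-membership tests.
--     chocolates.sort()
--     singles = set(chocolates)
--     sums = set()
--     tail = chocolates
--     while tail:
--         a, tail = tail[0], tail[1:]
--         for b in tail:
--             sums.add(a + b)
--     return ["I Like You" if w in singles or w in sums else "I Hate You"
--             for w in queries]
-- ===== Notes on version B (the rewrite author's own statement) =====
-- stated objective: faster
-- what changed: Instead of rescanning all pairs of chocolates per query, B precomputes the set of chocolates and the set of all pair sums once and answers each query with two set-membership tests.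
import Mathlib
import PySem

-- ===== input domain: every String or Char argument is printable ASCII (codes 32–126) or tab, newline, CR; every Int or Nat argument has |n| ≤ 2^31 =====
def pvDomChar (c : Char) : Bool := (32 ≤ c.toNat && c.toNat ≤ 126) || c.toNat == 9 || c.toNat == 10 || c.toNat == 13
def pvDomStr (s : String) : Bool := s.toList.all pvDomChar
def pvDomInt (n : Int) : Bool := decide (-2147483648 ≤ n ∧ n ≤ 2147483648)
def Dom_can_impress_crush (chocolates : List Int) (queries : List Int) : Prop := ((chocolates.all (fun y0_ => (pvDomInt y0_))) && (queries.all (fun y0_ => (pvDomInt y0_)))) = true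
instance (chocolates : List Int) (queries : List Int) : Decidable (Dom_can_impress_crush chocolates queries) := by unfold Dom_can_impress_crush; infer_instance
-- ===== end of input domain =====

-- B sorts like A (same in-place mutation), then precomputes the set of all pair sums once so each
-- query is two set-membership tests instead of a fresh O(n^2) pair scan (objective: faster).


-- ===== PORT A =====
-- 'chocolates.sort()' then, per query, a membership test and a nested index scan over all pairs.
-- The 'flag = 1' + 'break' pattern is ported as a sticky flag: once true it never changes.
def can_impress_crush (chocolates : List Int) (queries : List Int) : List String :=
  let s := PySem.List.sorted chocolates (fun x => x) false
  queries.foldl (fun results w =>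
    let flag : Bool :=
      if s.contains w then true
      else
        (PySem.List.pyRange 0 ((s.length : Int) - 1) 1).foldl (fun f j =>
          (PySem.List.pyRange (j + 1) (s.length : Int) 1).foldl (fun g k =>
            if PySem.List.pyGetD s j 0 + PySem.List.pyGetD s k 0 == w then true else g) f) false
    results ++ [if flag then "I Like You" else "I Hate You"]) []

-- ===== PORT B =====
-- 'while tail: a, tail = tail[0], tail[1:]; for b in tail: sums.add(a + b)'
def pvPairSums : List Int → PySem.Set Int → PySem.Set Int
  | [], sums => sums
  | a :: tail, sums => pvPairSums tail (tail.foldl (fun acc b => PySem.Set.add acc (a + b)) sums)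

def can_impress_crush_alt (chocolates : List Int) (queries : List Int) : List String :=
  let s := PySem.List.sorted chocolates (fun x => x) false
  let singles : PySem.Set Int := PySem.Set.ofList s
  let sums : PySem.Set Int := pvPairSums s PySem.Set.empty
  queries.map (fun w =>
    if PySem.Set.contains singles w || PySem.Set.contains sums w then "I Like You" else "I Hate You")

-- ===== PRECONDITION & SPEC =====
def Spec_can_impress_crush (chocolates : List Int) (queries : List Int) (out : List String) : Prop := out = can_impress_crush_alt chocolates queries
instance (chocolates : List Int) (queries : List Int) (out : List String) : Decidable (Spec_can_impress_crush chocolates queries out) := by unfold Spec_can_impress_crush; infer_instance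

-- ===== CLAIM (what is proved, stated in full; the proofs are below) =====
def Claim_equal_can_impress_crush : Prop := ∀ (chocolates : List Int) (queries : List Int), Dom_can_impress_crush chocolates queries → Spec_can_impress_crush chocolates queries (can_impress_crush chocolates queries)

-- ===== LEMMAS AND PROOFS =====

-- "some element and a strictly later element of s sum to w", structurally
def pvPairAny : List Int → Int → Bool
  | [], _ => false
  | a :: t, w => t.any (fun b => a + b == w) || pvPairAny t w

theorem pvMem_foldl_add (t : List Int) (a w : Int) (acc : PySem.Set Int) :
    (w ∈ t.foldl (fun acc b => PySem.Set.add acc (a + b)) acc) ↔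
      w ∈ acc ∨ t.any (fun b => a + b == w) = true := by
  induction t generalizing acc with
  | nil => simp
  | cons b t ih =>
      simp [List.foldl_cons, ih, PySem.Set.mem_add, List.any_cons]
      constructor
      · rintro (((h | h) | h) | h) <;> tauto
      · rintro (h | (h | h)) <;> tauto

theorem pvMem_pairSums (s : List Int) (w : Int) (acc : PySem.Set Int) :
    (w ∈ pvPairSums s acc) ↔ w ∈ acc ∨ pvPairAny s w = true := by
  induction s generalizing acc with
  | nil => simp [pvPairSums, pvPairAny]
  | cons a t ih =>
      simp [pvPairSums, pvPairAny, ih, pvMem_foldl_add, or_assoc]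

-- the index form of the nested scan, over the structural list
theorem pvIdx_eq_pairAny (s : List Int) (w : Int) :
    (List.range (s.length - 1)).any (fun k => (s.drop (k+1)).any (fun b => s.getD k 0 + b == w))
      = pvPairAny s w := by
  induction s with
  | nil => rfl
  | cons a t ih =>
      cases t with
      | nil => rfl
      | cons c t' =>
          rw [pvPairAny]
          simp only [List.length_cons, Nat.add_sub_cancel, List.range_succ_eq_map,
            List.any_cons, List.any_map]
          rw [← ih]
          simp [Function.comp_def]

theorem pvFoldl_or (l : List Int) (p : Int → Bool) (b : Bool) :
    l.foldl (fun f j => f || p j) b = (b || l.any p) := by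
  rw [← PySem.List.foldl_if_true_eq p l b]
  apply PySem.List.foldl_congr_mem; intro acc x hx; cases p x <;> simp

theorem pvNested_eq_pairAny (s : List Int) (w : Int) :
    (PySem.List.pyRange 0 ((s.length : Int) - 1) 1).foldl (fun f j =>
        (PySem.List.pyRange (j + 1) (s.length : Int) 1).foldl (fun g k =>
          if PySem.List.pyGetD s j 0 + PySem.List.pyGetD s k 0 == w then true else g) f) false
      = pvPairAny s w := by
  have h2 := PySem.List.foldl_congr_mem
    (l := PySem.List.pyRange 0 ((s.length : Int) - 1) 1) (init := false)
    (f := fun f j =>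
        (PySem.List.pyRange (j + 1) (s.length : Int) 1).foldl (fun g k =>
          if PySem.List.pyGetD s j 0 + PySem.List.pyGetD s k 0 == w then true else g) f)
    (g := fun f j => f || (List.drop (j+1).toNat s).any (fun b => PySem.List.pyGetD s j 0 + b == w))
    (by
      intro f j hj
      have hj0 : 0 ≤ j := ((PySem.List.mem_pyRange_one).mp hj).1
      simp only []
      rw [PySem.List.foldl_if_true_eq]
      congr 1
      rw [← PySem.List.map_pyGetD_pyRange' s 0 (by omega : (0:Int) ≤ j + 1), List.any_map]
      rfl)
  rw [h2, pvFoldl_or, Bool.false_or, PySem.List.pyRange_one, List.any_map]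
  rw [← pvIdx_eq_pairAny s w]
  have hlen : ((s.length : Int) - 1 - 0).toNat = s.length - 1 := by omega
  rw [hlen]
  apply PySem.List.any_congr_mem
  intro k hk
  simp

theorem pvContains_eq (l : PySem.Set Int) (w : Int) : PySem.Set.contains l w = decide (w ∈ l) := by
  show List.contains l w = decide (w ∈ l)
  by_cases h : w ∈ l <;> simp [h]

theorem pvPerQuery (s : List Int) (w : Int) :
    (if s.contains w then true
     else
       (PySem.List.pyRange 0 ((s.length : Int) - 1) 1).foldl (fun f j =>
         (PySem.List.pyRange (j + 1) (s.length : Int) 1).foldl (fun g k =>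
           if PySem.List.pyGetD s j 0 + PySem.List.pyGetD s k 0 == w then true else g) f) false)
      = (PySem.Set.contains (PySem.Set.ofList s) w
          || PySem.Set.contains (pvPairSums s PySem.Set.empty) w) := by
  have hof : PySem.Set.contains (PySem.Set.ofList s) w = s.contains w := by
    rw [pvContains_eq]
    by_cases h : w ∈ s <;> simp [PySem.Set.mem_ofList, h]
  have hps : PySem.Set.contains (pvPairSums s PySem.Set.empty) w = pvPairAny s w := by
    rw [pvContains_eq]
    have h := pvMem_pairSums s w PySem.Set.empty
    simp only [PySem.Set.empty, List.not_mem_nil, false_or] at h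
    cases hp : pvPairAny s w
    · simp [hp] at h; simp [h]
    · simp [hp] at h; simp [h]
  rw [hof, hps]
  cases hc : s.contains w
  · rw [Bool.false_or]
    exact pvNested_eq_pairAny s w
  · rfl

-- ===== VERDICT (by name: the statement is the Claim_ definition above) =====
theorem can_impress_crush_spec : Claim_equal_can_impress_crush := by
  intro chocolates queries _
  unfold Spec_can_impress_crush can_impress_crush can_impress_crush_alt
  simp only []
  rw [PySem.List.foldl_append_singleton_eq_map, List.nil_append]
  apply List.map_congr_left
  intro w _
  rw [pvPerQuery]
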